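-- pv_equiv track=rewrite | github.com/HigorHenrique4tech/cloud-hub-manager | backend/app/services/azure_advisor_service.py | _extract_resource_type
-- ===== SOURCE A (Python) =====
-- def _extract_resource_type(resource_id: str) -> str:
--     """Extract resource type from ARM ID."""
--     if not resource_id:
--         return "unknown"
--     parts = resource_id.split("/")
--     # ARM format: .../providers/Microsoft.Compute/virtualMachines/vm-name
--     try:
--         idx = next(i for i, p in enumerate(parts) if p.lower() == "providers")
--         if idx + 2 < len(parts):
--             return f"{parts[idx+1]}/{parts[idx+2]}"
--     except StopIteration:
--         pass
--     return "unknown"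
-- ===== SOURCE B (Python) =====
-- def _extract_resource_type(resource_id: str) -> str:
--     """Extract resource type from ARM ID."""
--     # Substring search instead of splitting the whole ID: the first segment equal
--     # (case-insensitively) to "providers" is exactly the first occurrence of the
--     # substring "/providers/" in the slash-padded lowercased ID.
--     pos = ("/" + resource_id.lower()).find("/providers/")
--     if pos == -1:
--         return "unknown"
--     segs = resource_id[pos + 10:].split("/")
--     return f"{segs[0]}/{segs[1]}" if len(segs) >= 2 else "unknown"
-- ===== Notes on version B (the rewrite author's own statement) =====
-- stated objective: alternative
-- what changed: Instead of splitting the whole ID into segments and scanning them with enumerate/next for a segment equal to 'providers', B does a single substring search for '/providers/' in the slash-padded lowercased ID and then splits only the suffix after the match.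
import Mathlib
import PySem

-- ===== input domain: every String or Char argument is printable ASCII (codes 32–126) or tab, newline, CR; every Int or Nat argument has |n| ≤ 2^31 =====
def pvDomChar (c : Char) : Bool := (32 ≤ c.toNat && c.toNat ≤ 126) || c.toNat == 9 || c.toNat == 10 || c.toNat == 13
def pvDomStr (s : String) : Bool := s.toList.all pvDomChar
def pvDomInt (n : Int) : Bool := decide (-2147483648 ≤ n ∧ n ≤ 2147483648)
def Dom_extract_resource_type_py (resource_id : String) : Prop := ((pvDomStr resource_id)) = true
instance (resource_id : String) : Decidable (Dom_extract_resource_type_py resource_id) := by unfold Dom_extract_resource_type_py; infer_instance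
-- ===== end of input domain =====

-- B replaces A's split-whole-ID + enumerate index search by a single substring
-- search for "/providers/" in the slash-padded lowercased ID, then splits only
-- the suffix after the match (alternative algorithm, same cost).


-- ===== PORT A =====
-- if not resource_id: return "unknown"; parts = resource_id.split("/");
-- idx = next(i for i, p in enumerate(parts) if p.lower() == "providers")  (StopIteration → "unknown");
-- if idx + 2 < len(parts): return f"{parts[idx+1]}/{parts[idx+2]}"; return "unknown".
-- Strings are handled on the List Char side throughout (PySem.Chars), exact on the ASCII domain.
def extract_resource_type_py (resource_id : String) : String :=
  if resource_id == "" then "unknown"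
  else
    let parts := PySem.Chars.splitOn resource_id.toList ['/']
    match parts.findIdx? (fun p => PySem.Chars.lower p == "providers".toList) with
    | some idx =>
        if idx + 2 < parts.length then
          String.ofList (PySem.List.pyGetD parts ((idx : Int) + 1) [] ++ '/' :: PySem.List.pyGetD parts ((idx : Int) + 2) [])
        else "unknown"
    | none => "unknown"

-- ===== PORT B =====
-- pos = ("/" + resource_id.lower()).find("/providers/"); if pos == -1: return "unknown";
-- segs = resource_id[pos + 10:].split("/"); return f"{segs[0]}/{segs[1]}" if len(segs) >= 2 else "unknown".
def extract_resource_type_py_alt (resource_id : String) : String :=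
  let pos := PySem.Chars.find ('/' :: PySem.Chars.lower resource_id.toList) "/providers/".toList
  if pos = -1 then "unknown"
  else
    let segs := PySem.Chars.splitOn (PySem.List.slice resource_id.toList (some (pos + 10)) none) ['/']
    if 2 ≤ segs.length then
      String.ofList (PySem.List.pyGetD segs 0 [] ++ '/' :: PySem.List.pyGetD segs 1 [])
    else "unknown"

-- ===== PRECONDITION & SPEC =====
def Spec_extract_resource_type_py (resource_id : String) (out : String) : Prop := out = extract_resource_type_py_alt resource_id
instance (resource_id : String) (out : String) : Decidable (Spec_extract_resource_type_py resource_id out) := by unfold Spec_extract_resource_type_py; infer_instance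

-- ===== CLAIM (what is proved, stated in full; the proofs are below) =====
def Claim_equal_extract_resource_type_py : Prop := ∀ (resource_id : String), Dom_extract_resource_type_py resource_id → Spec_extract_resource_type_py resource_id (extract_resource_type_py resource_id)

-- ===== LEMMAS AND PROOFS =====

-- Proof-side views of the two port bodies on a raw character list.
def armCore (parts : List (List Char)) : String :=
  match parts.findIdx? (fun p => PySem.Chars.lower p == "providers".toList) with
  | some idx =>
      if idx + 2 < parts.length then
        String.ofList (PySem.List.pyGetD parts ((idx : Int) + 1) [] ++ '/' :: PySem.List.pyGetD parts ((idx : Int) + 2) [])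
      else "unknown"
  | none => "unknown"

def armB (cs : List Char) : String :=
  let pos := PySem.Chars.find ('/' :: PySem.Chars.lower cs) "/providers/".toList
  if pos = -1 then "unknown"
  else
    let segs := PySem.Chars.splitOn (PySem.List.slice cs (some (pos + 10)) none) ['/']
    if 2 ≤ segs.length then
      String.ofList (PySem.List.pyGetD segs 0 [] ++ '/' :: PySem.List.pyGetD segs 1 [])
    else "unknown"

-- lowerChar maps only '/' to '/'.
theorem lowerChar_eq_slash_iff (c : Char) : PySem.Chars.lowerChar c = '/' ↔ c = '/' := by
  unfold PySem.Chars.lowerChar PySem.Chars.isupper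
  split_ifs with h
  · rw [Bool.and_eq_true, decide_eq_true_eq, decide_eq_true_eq] at h
    have h65 : 65 ≤ c.toNat := by
      have := h.1; rw [Char.le_def, UInt32.le_iff_toNat_le] at this; simpa using this
    have h90 : c.toNat ≤ 90 := by
      have := h.2; rw [Char.le_def, UInt32.le_iff_toNat_le] at this; simpa using this
    constructor
    · intro hc
      exfalso
      have hval : (c.toNat + 32).isValidChar := Or.inl (by omega)
      have ht : (Char.ofNat (c.toNat + 32)).toNat = c.toNat + 32 := by
        rw [Char.toNat_ofNat, if_pos hval]
      rw [hc] at ht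
      have : ('/' : Char).toNat = 47 := by decide
      omega
    · intro hc; subst hc; exact absurd h.1 (by decide)
  · exact Iff.rfl

theorem mem_slash_lower (u : List Char) : '/' ∈ PySem.Chars.lower u ↔ '/' ∈ u := by
  unfold PySem.Chars.lower
  rw [List.mem_map]
  constructor
  · rintro ⟨a, ha, hla⟩; rwa [(lowerChar_eq_slash_iff a).mp hla] at ha
  · intro h; exact ⟨'/', h, (lowerChar_eq_slash_iff '/').mpr rfl⟩

theorem lower_append (u v : List Char) :
    PySem.Chars.lower (u ++ v) = PySem.Chars.lower u ++ PySem.Chars.lower v := by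
  unfold PySem.Chars.lower; exact List.map_append

theorem lower_cons_slash (v : List Char) :
    PySem.Chars.lower ('/' :: v) = '/' :: PySem.Chars.lower v := by
  unfold PySem.Chars.lower; rfl

theorem length_lower (u : List Char) : (PySem.Chars.lower u).length = u.length := by
  unfold PySem.Chars.lower; exact List.length_map ..


-- unfolding equations for PySem.Chars.splitOn.go (generated by rw on the definition)
theorem go_zero (sep : List Char) (l cur : List Char) (acc : List (List Char)) :
    PySem.Chars.splitOn.go sep 0 l cur acc = ((cur.reverse ++ l) :: acc).reverse := by
  rw [PySem.Chars.splitOn.go]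

theorem go_nil_succ (sep : List Char) (n : Nat) (cur : List Char) (acc : List (List Char)) :
    PySem.Chars.splitOn.go sep (n + 1) [] cur acc = (cur.reverse :: acc).reverse := by
  rw [PySem.Chars.splitOn.go]
  omega

theorem go_cons (sep : List Char) (n : Nat) (c : Char) (rest cur : List Char) (acc : List (List Char)) :
    PySem.Chars.splitOn.go sep (n + 1) (c :: rest) cur acc =
      if sep.isPrefixOf (c :: rest) then
        PySem.Chars.splitOn.go sep n (List.drop sep.length (c :: rest)) [] (cur.reverse :: acc)
      else PySem.Chars.splitOn.go sep n rest (c :: cur) acc := by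
  rw [PySem.Chars.splitOn.go]

-- splitOn.go: the accumulator is a reversed prefix of the result.
theorem go_acc (sep : List Char) (fuel : Nat) :
    ∀ (l cur : List Char) (acc : List (List Char)),
      PySem.Chars.splitOn.go sep fuel l cur acc = acc.reverse ++ PySem.Chars.splitOn.go sep fuel l cur [] := by
  induction fuel with
  | zero => intro l cur acc; rw [go_zero, go_zero]; simp
  | succ n ih =>
    intro l cur acc
    cases l with
    | nil => rw [go_nil_succ, go_nil_succ]; simp
    | cons c rest =>
      rw [go_cons, go_cons]
      by_cases hp : sep.isPrefixOf (c :: rest)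
      · rw [if_pos hp, if_pos hp, ih _ [] (cur.reverse :: acc), ih _ [] [cur.reverse]]
        simp
      · rw [if_neg hp, if_neg hp, ih rest (c :: cur) acc]

-- splitOn.go on a separator-free list yields one final piece (any fuel).
theorem go_noslash (fuel : Nat) :
    ∀ (l cur : List Char) (acc : List (List Char)), '/' ∉ l →
      PySem.Chars.splitOn.go ['/'] fuel l cur acc = acc.reverse ++ [cur.reverse ++ l] := by
  induction fuel with
  | zero => intro l cur acc _; rw [go_zero]; simp
  | succ n ih =>
    intro l cur acc hl
    cases l with
    | nil => rw [go_nil_succ]; simp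
    | cons c rest =>
      rw [go_cons]
      have hc : c ≠ '/' := fun h => hl (h ▸ List.mem_cons_self)
      have hp : ¬ (['/'].isPrefixOf (c :: rest) = true) := by
        simp [List.isPrefixOf, hc.symm]
      rw [if_neg hp, ih rest (c :: cur) acc (fun h => hl (List.mem_cons_of_mem _ h))]
      simp

-- splitOn.go walks a separator-free segment up to the next '/'.
theorem go_seg (seg : List Char) (hseg : '/' ∉ seg) (fuel : Nat) :
    ∀ (cur rest : List Char) (acc : List (List Char)),
      PySem.Chars.splitOn.go ['/'] (seg.length + 1 + fuel) (seg ++ '/' :: rest) cur acc =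
        PySem.Chars.splitOn.go ['/'] fuel rest [] ((cur.reverse ++ seg) :: acc) := by
  induction seg with
  | nil =>
    intro cur rest acc
    have h1 : ([] : List Char).length + 1 + fuel = fuel + 1 := by simp; omega
    rw [h1, List.nil_append, go_cons]
    have hp : ['/'].isPrefixOf ('/' :: rest) = true := by simp [List.isPrefixOf]
    rw [if_pos hp]
    simp
  | cons c seg' ih =>
    intro cur rest acc
    have hc : c ≠ '/' := fun h => hseg (h ▸ List.mem_cons_self)
    have hlen : (c :: seg').length + 1 + fuel = (seg'.length + 1 + fuel) + 1 := by
      simp; omega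
    rw [List.cons_append, hlen, go_cons]
    have hp : ¬ (['/'].isPrefixOf (c :: (seg' ++ '/' :: rest)) = true) := by
      simp [List.isPrefixOf, hc.symm]
    rw [if_neg hp, ih (fun h => hseg (List.mem_cons_of_mem _ h)) (c :: cur) rest acc]
    simp

theorem splitOn_noslash (cs : List Char) (h : '/' ∉ cs) :
    PySem.Chars.splitOn cs ['/'] = [cs] := by
  unfold PySem.Chars.splitOn
  rw [go_noslash (cs.length + 1) cs [] [] h]
  simp

theorem splitOn_cons (seg rest : List Char) (hseg : '/' ∉ seg) :
    PySem.Chars.splitOn (seg ++ '/' :: rest) ['/'] = seg :: PySem.Chars.splitOn rest ['/'] := by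
  unfold PySem.Chars.splitOn
  have hlen : (seg ++ '/' :: rest).length + 1 = seg.length + 1 + (rest.length + 1) := by
    simp; omega
  rw [hlen, go_seg seg hseg (rest.length + 1) [] rest []]
  rw [go_acc ['/'] (rest.length + 1) rest [] [([] : List Char).reverse ++ seg]]
  simp

-- find.go results are -1 or at least the running index.
theorem go_find_lb (sub : List Char) :
    ∀ (t : List Char) (k : Nat), PySem.Chars.find.go sub t k = -1 ∨ (k : Int) ≤ PySem.Chars.find.go sub t k := by
  intro t
  induction t with
  | nil =>
    intro k
    rw [PySem.Chars.find.go.eq_1]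
    by_cases h : sub.isEmpty <;> simp [h]
  | cons c t ih =>
    intro k
    rw [PySem.Chars.find.go.eq_2]
    by_cases h : sub.isPrefixOf (c :: t)
    · simp [h]
    · rw [if_neg h]
      rcases ih (k + 1) with h1 | h1
      · exact Or.inl h1
      · right; omega

-- find.go with running index k is the k-shift of find.go at 0.
theorem go_find_shift (sub : List Char) :
    ∀ (t : List Char) (k : Nat),
      PySem.Chars.find.go sub t k =
        if PySem.Chars.find.go sub t 0 = -1 then -1 else (k : Int) + PySem.Chars.find.go sub t 0 := by
  intro t
  induction t with
  | nil =>
    intro k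
    rw [PySem.Chars.find.go.eq_1, PySem.Chars.find.go.eq_1]
    by_cases h : sub.isEmpty <;> simp [h]
  | cons c t ih =>
    intro k
    rw [PySem.Chars.find.go.eq_2, PySem.Chars.find.go.eq_2]
    by_cases h : sub.isPrefixOf (c :: t)
    · simp [h]
    · rw [if_neg h, if_neg h, ih (k + 1), ih 1]
      rcases go_find_lb sub t 0 with h0 | h0
      · simp [h0]
      · have hne : ¬ (PySem.Chars.find.go sub t 0 = -1) := by omega
        simp only [hne, if_false]
        have h1 : ¬ (((1 : Nat) : Int) + PySem.Chars.find.go sub t 0 = -1) := by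
          push_cast at h0 ⊢; omega
        rw [if_neg h1]
        push_cast
        ring

theorem find_eq_zero_of_prefix (s sub : List Char) (hne : sub ≠ []) (h : sub <+: s) :
    PySem.Chars.find s sub = 0 := by
  cases s with
  | nil => exact absurd (List.prefix_nil.mp h) hne
  | cons c t =>
    unfold PySem.Chars.find
    rw [PySem.Chars.find.go.eq_2, if_pos (List.isPrefixOf_iff_prefix.mpr h)]
    simp

-- the pattern, decomposed
theorem pat_decomp : "/providers/".toList = '/' :: ("providers".toList ++ ['/']) := by decide

-- no slash in cs → the pattern does not occur in '/'::lower cs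
theorem find_noslash (cs : List Char) (h : '/' ∉ cs) :
    PySem.Chars.find ('/' :: PySem.Chars.lower cs) "/providers/".toList = -1 := by
  rw [PySem.Chars.find_eq_neg_one_iff]
  intro hinf
  have hsub := hinf.sublist
  have hcount := hsub.count_le '/'
  have h2 : List.count '/' "/providers/".toList = 2 := by decide
  have h0 : List.count '/' (PySem.Chars.lower cs) = 0 :=
    List.count_eq_zero.mpr (fun hm => h ((mem_slash_lower cs).mp hm))
  rw [h2, List.count_cons_self, h0] at hcount
  omega

-- first-occurrence-of-x splits agree
theorem append_slash_inj (x : Char) :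
    ∀ (a b u v : List Char), x ∉ a → x ∉ b → a ++ x :: u = b ++ x :: v → a = b := by
  intro a
  induction a with
  | nil =>
    intro b u v _ hb he
    cases b with
    | nil => rfl
    | cons d b' =>
      exfalso
      rw [List.nil_append, List.cons_append, List.cons_eq_cons] at he
      exact hb (he.1 ▸ List.mem_cons_self)
  | cons c a' ih =>
    intro b u v ha hb he
    cases b with
    | nil =>
      exfalso
      rw [List.nil_append, List.cons_append, List.cons_eq_cons] at he
      exact ha (he.1.symm ▸ List.mem_cons_self)
    | cons d b' =>
      rw [List.cons_append, List.cons_append, List.cons_eq_cons] at he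
      rw [he.1, ih b' u v (fun hm => ha (List.mem_cons_of_mem _ hm))
            (fun hm => hb (List.mem_cons_of_mem _ hm)) he.2]

-- a non-"providers" slash-free segment: the pattern is not a prefix of the padded string
theorem pat_not_prefix (ls r : List Char) (hls : '/' ∉ ls) (hne : ls ≠ "providers".toList) :
    ¬ ("/providers/".toList <+: ('/' :: ls ++ '/' :: r)) := by
  intro h
  rw [pat_decomp] at h
  rw [List.cons_append] at h
  rw [List.cons_prefix_cons] at h
  obtain ⟨z, hz⟩ := h.2
  rw [List.append_assoc] at hz
  have : "providers".toList ++ '/' :: z = ls ++ '/' :: r := by simpa using hz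
  exact hne (append_slash_inj '/' ls "providers".toList r z hls (by decide) this.symm)

-- stepping the search over a slash-free non-matching segment
theorem find_step (ls r : List Char) (hls : '/' ∉ ls) (hne : ls ≠ "providers".toList) :
    PySem.Chars.find ('/' :: (ls ++ '/' :: r)) "/providers/".toList =
      if PySem.Chars.find ('/' :: r) "/providers/".toList = -1 then -1
      else ((ls.length : Int) + 1) + PySem.Chars.find ('/' :: r) "/providers/".toList := by
  have hwalk : ∀ (u : List Char), '/' ∉ u → ∀ (k : Nat),
      PySem.Chars.find.go "/providers/".toList (u ++ '/' :: r) k =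
        PySem.Chars.find.go "/providers/".toList ('/' :: r) (k + u.length) := by
    intro u
    induction u with
    | nil => intro _ k; simp
    | cons c u' ih =>
      intro hu k
      have hc : c ≠ '/' := fun h => hu (h ▸ List.mem_cons_self)
      rw [List.cons_append, PySem.Chars.find.go.eq_2]
      have hp : ¬ ("/providers/".toList.isPrefixOf (c :: (u' ++ '/' :: r)) = true) := by
        rw [List.isPrefixOf_iff_prefix, pat_decomp]
        intro hpre
        rw [List.cons_prefix_cons] at hpre
        exact hc.symm hpre.1
      rw [if_neg hp, ih (fun h => hu (List.mem_cons_of_mem _ h)) (k + 1)]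
      congr 1
      simp
      omega
  unfold PySem.Chars.find
  rw [PySem.Chars.find.go.eq_2]
  have hp : ¬ ("/providers/".toList.isPrefixOf ('/' :: (ls ++ '/' :: r)) = true) := by
    rw [List.isPrefixOf_iff_prefix]
    have := pat_not_prefix ls r hls hne
    simpa using this
  rw [if_neg hp, hwalk ls hls 1, go_find_shift]
  split_ifs with h0
  · rfl
  · push_cast
    ring

-- A's result shifts over a non-matching head segment.
theorem armCore_cons_of_ne (seg : List Char) (ps : List (List Char))
    (hseg : (PySem.Chars.lower seg == "providers".toList) = false) :
    armCore (seg :: ps) = armCore ps := by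
  unfold armCore
  have hb : ¬ PySem.Chars.lower seg = "providers".toList := by simpa using hseg
  rw [List.findIdx?_cons, if_neg (by simpa using hb)]
  cases hfi : List.findIdx? (fun p => PySem.Chars.lower p == "providers".toList) ps with
  | none => simp
  | some j =>
    simp only [Option.map_some]
    have hlen : (j + 1) + 2 < (seg :: ps).length ↔ j + 2 < ps.length := by simp; omega
    by_cases hj : j + 2 < ps.length
    · rw [if_pos (hlen.mpr hj), if_pos hj]
      rw [show (((j + 1 : Nat)) : Int) + 1 = (((j + 2 : Nat)) : Int) by push_cast; ring,
          show (((j + 1 : Nat)) : Int) + 2 = (((j + 3 : Nat)) : Int) by push_cast; ring,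
          show ((j : Nat) : Int) + 1 = (((j + 1 : Nat)) : Int) by push_cast; ring,
          show ((j : Nat) : Int) + 2 = (((j + 2 : Nat)) : Int) by push_cast; ring]
      simp only [PySem.List.pyGetD_natCast]
      have h1 : (seg :: ps).getD (j + 2) [] = ps.getD (j + 1) [] := rfl
      have h2 : (seg :: ps).getD (j + 3) [] = ps.getD (j + 2) [] := rfl
      rw [h1, h2]
    · rw [if_neg (fun h => hj (hlen.mp h)), if_neg hj]


-- A's result on a matching head segment.
theorem armCore_match (seg : List Char) (ps : List (List Char))
    (hm : PySem.Chars.lower seg = "providers".toList) :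
    armCore (seg :: ps) =
      if 2 ≤ ps.length then
        String.ofList (PySem.List.pyGetD ps 0 [] ++ '/' :: PySem.List.pyGetD ps 1 [])
      else "unknown" := by
  unfold armCore
  rw [List.findIdx?_cons, if_pos (by simp [hm])]
  show (if 0 + 2 < (seg :: ps).length then
      String.ofList (PySem.List.pyGetD (seg :: ps) (((0 : Nat) : Int) + 1) [] ++ '/' ::
        PySem.List.pyGetD (seg :: ps) (((0 : Nat) : Int) + 2) [])
    else "unknown") = _
  have hg : (0 + 2 < (seg :: ps).length) ↔ 2 ≤ ps.length := by simp
  by_cases h2 : 2 ≤ ps.length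
  · rw [if_pos (hg.mpr h2), if_pos h2]
    rw [show ((0 : Nat) : Int) + 1 = ((1 : Nat) : Int) by norm_num,
        show ((0 : Nat) : Int) + 2 = ((2 : Nat) : Int) by norm_num]
    simp only [PySem.List.pyGetD_natCast]
    rw [show PySem.List.pyGetD ps 0 [] = ps.getD 0 [] from by
          exact_mod_cast PySem.List.pyGetD_natCast ps 0 [],
        show PySem.List.pyGetD ps 1 [] = ps.getD 1 [] from by
          exact_mod_cast PySem.List.pyGetD_natCast ps 1 []]
    rfl
  · rw [if_neg (fun h => h2 (hg.mp h)), if_neg h2]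

-- decompose a list at its first '/'
theorem first_slash : ∀ (cs : List Char), '/' ∈ cs → ∃ seg rest, cs = seg ++ '/' :: rest ∧ '/' ∉ seg := by
  intro cs h
  induction cs with
  | nil => cases h
  | cons c t ih =>
    by_cases hc : c = '/'
    · exact ⟨[], t, by rw [hc]; rfl, by simp⟩
    · have ht : '/' ∈ t := by
        rcases List.mem_cons.mp h with h1 | h1
        · exact absurd h1.symm hc
        · exact h1
      obtain ⟨s, r, he, hn⟩ := ih ht
      refine ⟨c :: s, r, by rw [he]; rfl, ?_⟩
      intro hm
      rcases List.mem_cons.mp hm with h1 | h1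
      · exact hc h1.symm
      · exact hn h1

-- B is invariant under stripping a leading non-matching slash-free segment.
theorem armB_step (seg rest : List Char) (hseg : '/' ∉ seg)
    (hne : PySem.Chars.lower seg ≠ "providers".toList) :
    armB (seg ++ '/' :: rest) = armB rest := by
  have hlow : PySem.Chars.lower (seg ++ '/' :: rest) =
      PySem.Chars.lower seg ++ '/' :: PySem.Chars.lower rest := by
    rw [lower_append, lower_cons_slash]
  have hlsnos : '/' ∉ PySem.Chars.lower seg := fun h => hseg ((mem_slash_lower seg).mp h)
  unfold armB
  simp only []
  rw [hlow, find_step (PySem.Chars.lower seg) (PySem.Chars.lower rest) hlsnos hne]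
  by_cases hf : PySem.Chars.find ('/' :: PySem.Chars.lower rest) "/providers/".toList = -1
  · rw [if_pos hf, if_pos rfl, if_pos hf]
  · rw [if_neg hf]
    have hp0 : 0 ≤ PySem.Chars.find ('/' :: PySem.Chars.lower rest) "/providers/".toList := by
      rw [PySem.Chars.find_nonneg_iff]
      exact (PySem.Chars.find_ne_neg_one_iff _ _).mp hf
    set p := PySem.Chars.find ('/' :: PySem.Chars.lower rest) "/providers/".toList with hpdef
    have hlen : (PySem.Chars.lower seg).length = seg.length := length_lower seg
    have hnneg : ¬ (((PySem.Chars.lower seg).length : Int) + 1 + p = -1) := by omega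
    rw [if_neg hnneg, if_neg hf]
    have hslice : PySem.List.slice (seg ++ '/' :: rest) (some (((PySem.Chars.lower seg).length : Int) + 1 + p + 10)) none =
        PySem.List.slice rest (some (p + 10)) none := by
      rw [PySem.List.slice_from (xs := seg ++ '/' :: rest)
            (a := ((PySem.Chars.lower seg).length : Int) + 1 + p + 10) (by omega),
          PySem.List.slice_from (xs := rest) (a := p + 10) (by omega)]
      have harr : seg ++ '/' :: rest = (seg ++ ['/']) ++ rest := by simp
      have htn : ((((PySem.Chars.lower seg).length : Int) + 1 + p + 10)).toNat =
          (seg ++ ['/']).length + (p + 10).toNat := by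
        simp [hlen]
        omega
      rw [harr, htn, ← List.drop_drop (i := (p + 10).toNat) (j := (seg ++ ['/']).length),
          List.drop_left]
    rw [hslice]

-- main equivalence on character lists, by strong induction on the length
theorem core_le : ∀ (n : Nat) (cs : List Char), cs.length ≤ n →
    armCore (PySem.Chars.splitOn cs ['/']) = armB cs := by
  intro n
  induction n with
  | zero =>
    intro cs h
    have : cs = [] := List.eq_nil_of_length_eq_zero (Nat.le_zero.mp h)
    subst this
    decide
  | succ n ih =>
    intro cs hlen
    by_cases hs : '/' ∈ cs
    · obtain ⟨seg, rest, hcs, hseg⟩ := first_slash cs hs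
      subst hcs
      rw [splitOn_cons seg rest hseg]
      by_cases hmatch : PySem.Chars.lower seg = "providers".toList
      · -- the head segment matches: both sides read the two following segments
        have hlow : PySem.Chars.lower (seg ++ '/' :: rest) =
            PySem.Chars.lower seg ++ '/' :: PySem.Chars.lower rest := by
          rw [lower_append, lower_cons_slash]
        have hpre : "/providers/".toList <+: ('/' :: PySem.Chars.lower (seg ++ '/' :: rest)) := by
          rw [hlow, hmatch, pat_decomp]
          refine ⟨PySem.Chars.lower rest, ?_⟩
          simp
        have hfind : PySem.Chars.find ('/' :: PySem.Chars.lower (seg ++ '/' :: rest)) "/providers/".toList = 0 :=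
          find_eq_zero_of_prefix _ _ (by decide) hpre
        have hseg9 : seg.length = 9 := by
          have hl := length_lower seg
          rw [hmatch] at hl
          simpa using hl.symm
        unfold armB
        simp only []
        rw [hfind, if_neg (by norm_num)]
        have hslice : PySem.List.slice (seg ++ '/' :: rest) (some ((0 : Int) + 10)) none = rest := by
          rw [PySem.List.slice_from (xs := seg ++ '/' :: rest) (a := (0 : Int) + 10) (by norm_num)]
          have harr : seg ++ '/' :: rest = (seg ++ ['/']) ++ rest := by simp
          have htn : (((0 : Int) + 10)).toNat = (seg ++ ['/']).length := by simp [hseg9]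
          rw [harr, htn, List.drop_left]
        rw [hslice, armCore_match seg _ hmatch]
      · -- the head segment does not match: both sides step to `rest`
        have hb : (PySem.Chars.lower seg == "providers".toList) = false := by
          exact beq_eq_false_iff_ne.mpr hmatch
        rw [armCore_cons_of_ne seg _ hb]
        have hrest : rest.length ≤ n := by
          have : (seg ++ '/' :: rest).length = seg.length + 1 + rest.length := by simp; omega
          omega
        rw [ih rest hrest, armB_step seg rest hseg hmatch]
    · rw [splitOn_noslash cs hs]
      have hB : armB cs = "unknown" := by
        unfold armB
        simp only []
        rw [find_noslash cs hs, if_pos rfl]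
      rw [hB]
      unfold armCore
      by_cases hp : (PySem.Chars.lower cs == "providers".toList) = true
      · rw [List.findIdx?_cons, if_pos (by simpa using hp)]
        simp
      · rw [List.findIdx?_cons, if_neg (by simpa using hp), List.findIdx?_nil]
        simp

-- ===== VERDICT (by name: the statement is the Claim_ definition above) =====
theorem extract_resource_type_py_spec : Claim_equal_extract_resource_type_py := by
  intro s _
  unfold Spec_extract_resource_type_py
  by_cases h : s == ""
  · have hs : s = "" := by simpa using h
    subst hs
    decide
  · unfold extract_resource_type_py
    rw [if_neg h]
    exact core_le s.toList.length s.toList le_rfl
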